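-- pv_equiv track=rewrite | github.com/TaiwanJeffWang/leetcode | main.py | find_dupulicate
-- ===== SOURCE A (Python) =====
-- def find_dupulicate(length, s):
--     _set = set()
--     for i in range(len(s)):
--         temp = ""
--         if i + length > len(s):
--             break
--         for j in range(length):
--             temp += s[i + j]
--
--         if temp in _set:
--             return True, temp
--         else:
--             _set.add(temp)
--
--     return False, ""
-- ===== SOURCE B (Python) =====
-- def find_dupulicate(length, s):
--     n = len(s)
--     if length < 1 or length > n:
--         return False, ""
--     base, mod = 131, (1 << 61) - 1
--     pw = pow(base, length - 1, mod)
--     h = 0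
--     for c in s[:length]:
--         h = (h * base + ord(c)) % mod
--     buckets = {h: [0]}
--     for i in range(1, n - length + 1):
--         h = ((h - ord(s[i - 1]) * pw) * base + ord(s[i + length - 1])) % mod
--         temp = s[i:i + length]
--         hit = buckets.get(h)
--         if hit is None:
--             buckets[h] = [i]
--         else:
--             for j in hit:
--                 if s[j:j + length] == temp:
--                     return True, temp
--             hit.append(i)
--     return False, ""
-- ===== Notes on version B (the rewrite author's own statement) =====
-- stated objective: faster
-- what changed: Replaces A's O(n*length) scan (each window rebuilt char-by-char and looked up in a set of full strings) with a Rabin-Karp rolling hash: each window's hash is updated in O(1), windows are bucketed by hash, and full string comparison happens only on hash collision.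
-- outside the precondition, e.g. on find_dupulicate(0, 'ab'): A returns (True, ''), B returns (False, ''); on find_dupulicate(-1, 'xy'): A returns (True, ''), B returns (False, '')
import Mathlib
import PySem

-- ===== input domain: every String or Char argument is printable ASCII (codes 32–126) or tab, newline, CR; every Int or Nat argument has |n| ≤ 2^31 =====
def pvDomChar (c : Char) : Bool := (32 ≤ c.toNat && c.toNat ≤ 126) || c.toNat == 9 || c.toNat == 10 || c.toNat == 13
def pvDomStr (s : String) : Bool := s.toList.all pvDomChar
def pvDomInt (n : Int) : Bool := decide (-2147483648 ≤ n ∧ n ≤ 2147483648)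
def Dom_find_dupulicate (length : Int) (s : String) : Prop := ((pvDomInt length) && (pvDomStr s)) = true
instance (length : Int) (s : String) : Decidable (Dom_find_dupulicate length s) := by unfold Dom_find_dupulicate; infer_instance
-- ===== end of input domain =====

-- B replaces A's O(n*length) set-of-substrings scan with a Rabin-Karp rolling hash
-- (hash updated in O(1) per window, full comparison only within the matching hash bucket).

-- ===== PORT A =====
-- inner loop 'for j in range(length): temp += s[i+j]'; s[i+j] is provably in range
-- whenever this point is reached (the 'i + length > len(s)' break fires first), so
-- the none branch of pyGet? is dead code.
def pvTempA (cs : List Char) (i len : Int) : List Char :=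
  (PySem.List.pyRange 0 len).foldl
    (fun t j =>
      match PySem.List.pyGet? cs (i + j) with
      | some c => t ++ [c]
      | none => t) []

-- 'for i in range(len(s)): … break / return True, temp / _set.add(temp)'
def pvLoopA (len : Int) (cs : List Char) : List Int → PySem.Set (List Char) → Bool × List Char
  | [], _ => (false, [])
  | i :: rest, st =>
    if (cs.length : Int) < i + len then (false, [])
    else
      let temp := pvTempA cs i len
      if PySem.Set.contains st temp then (true, temp)
      else pvLoopA len cs rest (PySem.Set.add st temp)

def find_dupulicate (length : Int) (s : String) : Bool × String :=
  let r := pvLoopA length s.toList (PySem.List.pyRange 0 (PySem.Str.len s)) PySem.Set.empty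
  (r.1, String.ofList r.2)

-- ===== PORT B =====
-- mod = (1 << 61) - 1
def pvM : Int := ((1 : Int) <<< 61) - 1

-- h = (h * base + ord(c)) % mod
def pvHStep (h : Int) (c : Char) : Int := PySem.Int.mod (h * 131 + (c.toNat : Int)) pvM

-- the main rolling-hash loop of Source B; s[i-1] and s[i+length-1] are provably in
-- range whenever this loop runs, so pyGetD's default is dead code.
def pvLoopB (len : Int) (cs : List Char) (pw : Int) :
    List Int → Int → PySem.Dict Int (List Int) → Bool × List Char
  | [], _, _ => (false, [])
  | i :: rest, h, buckets =>
    let h' := PySem.Int.mod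
      ((h - ((PySem.List.pyGetD cs (i - 1) default).toNat : Int) * pw) * 131
        + ((PySem.List.pyGetD cs (i + len - 1) default).toNat : Int)) pvM
    let temp := PySem.List.slice cs (some i) (some (i + len))
    match buckets.get? h' with
    | none => pvLoopB len cs pw rest h' (buckets.insert h' [i])
    | some hit =>
      -- 'for j in hit: if s[j:j+length] == temp: return True, temp' … 'hit.append(i)'
      if hit.any (fun j => PySem.List.slice cs (some j) (some (j + len)) == temp)
      then (true, temp)
      else pvLoopB len cs pw rest h' (buckets.insert h' (hit ++ [i]))

def find_dupulicate_alt (length : Int) (s : String) : Bool × String :=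
  let cs := s.toList
  let n : Int := (cs.length : Int)
  if length < 1 ∨ n < length then (false, "")
  else
    -- pw = pow(base, length - 1, mod)
    let pw := PySem.Int.powMod 131 (length - 1).toNat pvM
    -- 'for c in s[:length]: h = (h * base + ord(c)) % mod'
    let h0 := (PySem.List.slice cs none (some length)).foldl pvHStep 0
    -- buckets = {h: [0]}
    let r := pvLoopB length cs pw (PySem.List.pyRange 1 (n - length + 1)) h0
               (PySem.Dict.insert PySem.Dict.empty h0 [0])
    (r.1, String.ofList r.2)

-- ===== PRECONDITION & SPEC =====
-- Pre_ excludes nonpositive length, which is outside the function's natural domain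
-- (a fixed-length substring search needs length ≥ 1): there A's answer — (True, "")
-- as soon as len(s) ≥ 2, because every window it builds degenerates to "" — is an
-- accidental artefact of its loop, and B's (False, "") is equally defensible.
def Pre_find_dupulicate (length : Int) (s : String) : Prop := 1 ≤ length
instance (length : Int) (s : String) : Decidable (Pre_find_dupulicate length s) := by
  unfold Pre_find_dupulicate; infer_instance

def pvWitness_find_dupulicate : Int × String := (2, "abab")

def Spec_find_dupulicate (length : Int) (s : String) (out : Bool × String) : Prop := out = find_dupulicate_alt length s
instance (length : Int) (s : String) (out : Bool × String) : Decidable (Spec_find_dupulicate length s out) := by unfold Spec_find_dupulicate; infer_instance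

-- ===== CLAIM (what is proved, stated in full; the proofs are below) =====
def Claim_equal_find_dupulicate : Prop := ∀ (length : Int) (s : String), Dom_find_dupulicate length s → Pre_find_dupulicate length s → Spec_find_dupulicate length s (find_dupulicate length s)

-- ===== LEMMAS AND PROOFS =====

-- the window of length L starting at i
def pvWnd (L : Nat) (cs : List Char) (i : Nat) : List Char := (cs.drop i).take L

-- the unreduced polynomial hash, and the reduced hash of window i
def pvPH (w : List Char) : Int := w.foldl (fun h c => h * 131 + (c.toNat : Int)) 0
def pvHH (L : Nat) (cs : List Char) (i : Nat) : Int := pvPH (pvWnd L cs i) % pvM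

-- common reference loop: first index whose window already occurred
def pvRef (L : Nat) (cs : List Char) : List Nat → List (List Char) → Bool × List Char
  | [], _ => (false, [])
  | i :: rest, seen =>
    let t := pvWnd L cs i
    if t ∈ seen then (true, t) else pvRef L cs rest (t :: seen)

-- bucket invariants for B's loop
def pvSound (L : Nat) (cs : List Char) (d : PySem.Dict Int (List Int)) (i : Nat) : Prop :=
  ∀ v js, d.get? v = some js → ∀ x ∈ js, ∃ j : Nat, x = (j : Int) ∧ j < i ∧ pvHH L cs j = v
def pvComplete (L : Nat) (cs : List Char) (d : PySem.Dict Int (List Int)) (i : Nat) : Prop :=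
  ∀ j : Nat, j < i → ∃ js, d.get? (pvHH L cs j) = some js ∧ (j : Int) ∈ js

theorem pvM_pos : (0 : Int) < pvM := by decide

theorem pvRef_cons (L : Nat) (cs : List Char) (i : Nat) (rest : List Nat) (seen : List (List Char)) :
    pvRef L cs (i :: rest) seen
      = if pvWnd L cs i ∈ seen then (true, pvWnd L cs i)
        else pvRef L cs rest (pvWnd L cs i :: seen) := rfl

theorem pvTempA_aux (cs : List Char) (i : Nat) :
    ∀ L : Nat, i + L ≤ cs.length →
    (List.range L).foldl
      (fun (t : List Char) (k : Nat) =>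
        match PySem.List.pyGet? cs ((i : Int) + (k : Int)) with
        | some c => t ++ [c]
        | none => t) []
      = pvWnd L cs i := by
  intro L
  induction L with
  | zero => intro _; simp [pvWnd]
  | succ m ih =>
    intro hle
    rw [List.range_succ, List.foldl_append, ih (by omega)]
    have hcast : (i : Int) + (m : Int) = ((i + m : Nat) : Int) := by push_cast; ring
    have him : i + m < cs.length := by omega
    simp only [List.foldl_cons, List.foldl_nil, hcast, PySem.List.pyGet?_natCast,
      List.getElem?_eq_getElem him]
    unfold pvWnd
    rw [List.take_add_one]
    congr 1
    rw [List.getElem?_drop]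
    simp [List.getElem?_eq_getElem him]

theorem pvTempA_eq (cs : List Char) (L i : Nat) (hle : i + L ≤ cs.length) :
    pvTempA cs (i : Int) (L : Int) = pvWnd L cs i := by
  unfold pvTempA
  rw [PySem.List.pyRange_zero_natCast, List.foldl_map]
  exact pvTempA_aux cs i L hle

theorem pvSlice_eq (cs : List Char) (L i : Nat) :
    PySem.List.slice cs (some (i : Int)) (some ((i : Int) + (L : Int))) = pvWnd L cs i := by
  have : (i : Int) + (L : Int) = ((i + L : Nat) : Int) := by push_cast; ring
  rw [this, PySem.List.slice_natCast]
  unfold pvWnd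
  congr 1
  omega

theorem pvPH_foldl (w : List Char) (a : Int) :
    w.foldl (fun h c => h * 131 + (c.toNat : Int)) a = a * 131 ^ w.length + pvPH w := by
  induction w generalizing a with
  | nil => simp [pvPH]
  | cons c t ih =>
    simp only [List.foldl_cons, List.length_cons, pvPH] at *
    rw [ih (a * 131 + (c.toNat : Int)), ih (0 * 131 + (c.toNat : Int))]
    ring

theorem pvHStep_foldl (w : List Char) (a : Int) :
    w.foldl pvHStep (a % pvM) = (w.foldl (fun h c => h * 131 + (c.toNat : Int)) a) % pvM := by
  induction w generalizing a with
  | nil => simp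
  | cons c t ih =>
    simp only [List.foldl_cons]
    rw [← ih (a * 131 + (c.toNat : Int))]
    congr 1
    unfold pvHStep
    rw [PySem.Int.mod_eq_emod_of_pos pvM_pos]
    conv_lhs => rw [Int.add_emod, Int.mul_emod, Int.emod_emod]
    conv_rhs => rw [Int.add_emod, Int.mul_emod]

theorem pvPH_cons (c : Char) (t : List Char) :
    pvPH (c :: t) = (c.toNat : Int) * 131 ^ t.length + pvPH t := by
  unfold pvPH
  simp only [List.foldl_cons]
  rw [pvPH_foldl]
  unfold pvPH; ring

theorem pvPH_snoc (t : List Char) (y : Char) :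
    pvPH (t ++ [y]) = pvPH t * 131 + (y.toNat : Int) := by
  unfold pvPH
  rw [List.foldl_append]
  simp

theorem pvWnd_pred (cs : List Char) (L i : Nat) (h1 : 1 ≤ i)
    (hL : 1 ≤ L) (hi : i - 1 < cs.length) :
    pvWnd L cs (i - 1) = cs[i - 1] :: (cs.drop i).take (L - 1) := by
  unfold pvWnd
  have hdrop : cs.drop (i - 1) = cs[i - 1] :: cs.drop i := by
    rw [List.drop_eq_getElem_cons hi, show i - 1 + 1 = i from by omega]
  rw [hdrop]
  have : L = (L - 1) + 1 := by omega
  rw [this, List.take_succ_cons]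
  simp

theorem pvWnd_snoc (cs : List Char) (L i : Nat) (hL : 1 ≤ L)
    (hy : i + L - 1 < cs.length) :
    pvWnd L cs i = (cs.drop i).take (L - 1) ++ [cs[i + L - 1]] := by
  unfold pvWnd
  have : L = (L - 1) + 1 := by omega
  conv_lhs => rw [this]
  rw [List.take_add_one]
  congr 1
  rw [List.getElem?_drop, show i + (L - 1) = i + L - 1 from by omega]
  rw [List.getElem?_eq_getElem hy]
  simp

theorem pvRolling (cs : List Char) (L i : Nat) (h1 : 1 ≤ i) (h2 : i + L ≤ cs.length)
    (hL : 1 ≤ L) (hc : i - 1 < cs.length) (hy : i + L - 1 < cs.length) :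
    PySem.Int.mod
      ((pvHH L cs (i - 1) - ((cs[i - 1]).toNat : Int) * PySem.Int.powMod 131 (L - 1) pvM) * 131
        + ((cs[i + L - 1]).toNat : Int)) pvM = pvHH L cs i := by
  have hmid : ((cs.drop i).take (L - 1)).length = L - 1 := by
    rw [List.length_take, List.length_drop]; omega
  set c : Int := ((cs[i - 1]).toNat : Int) with hc'
  set y : Int := ((cs[i + L - 1]).toNat : Int) with hy'
  set pm : Int := pvPH ((cs.drop i).take (L - 1)) with hpm
  have hHH1 : pvHH L cs (i - 1) = (c * 131 ^ (L - 1) + pm) % pvM := by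
    rw [pvHH, pvWnd_pred cs L i h1 hL hc, pvPH_cons, hmid]
  have hHH2 : pvHH L cs i = (pm * 131 + y) % pvM := by
    rw [pvHH, pvWnd_snoc cs L i hL hy, pvPH_snoc]
  rw [PySem.Int.powMod_eq, PySem.Int.mod_eq_emod_of_pos pvM_pos,
      PySem.Int.mod_eq_emod_of_pos pvM_pos, hHH1, hHH2]
  have hA : (c * 131 ^ (L - 1) + pm) % pvM ≡ c * 131 ^ (L - 1) + pm [ZMOD pvM] :=
    Int.emod_emod (c * 131 ^ (L - 1) + pm) pvM
  have hP : ((131 : Int) ^ (L - 1)) % pvM ≡ (131 : Int) ^ (L - 1) [ZMOD pvM] :=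
    Int.emod_emod ((131 : Int) ^ (L - 1)) pvM
  have hall : ((c * 131 ^ (L - 1) + pm) % pvM - c * ((131 : Int) ^ (L - 1) % pvM)) * 131 + y
      ≡ (c * 131 ^ (L - 1) + pm - c * (131 : Int) ^ (L - 1)) * 131 + y [ZMOD pvM] :=
    ((hA.sub (hP.mul_left c)).mul_right 131).add_right y
  have := hall
  unfold Int.ModEq at this
  rw [this]
  congr 1
  ring

theorem pvRunA (cs : List Char) (L : Nat) (hL : 1 ≤ L) (hLn : L ≤ cs.length) :
    ∀ (k i : Nat), i + k = cs.length - L + 1 →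
    ∀ (st : PySem.Set (List Char)) (seen : List (List Char)),
      (∀ t, PySem.Set.contains st t = true ↔ t ∈ seen) →
      pvLoopA (L : Int) cs (PySem.List.pyRange (i : Int) (cs.length : Int)) st
        = pvRef L cs (List.range' i k) seen := by
  intro k
  induction k with
  | zero =>
    intro i hik st seen hst
    have hi : i = cs.length - L + 1 := by omega
    simp only [List.range'_zero, pvRef]
    by_cases hin : i < cs.length
    · rw [PySem.List.pyRange_one_cons (by exact_mod_cast hin)]
      unfold pvLoopA
      rw [if_pos (by omega)]
    · rw [PySem.List.pyRange_one_eq_nil (by exact_mod_cast Nat.le_of_not_lt hin)]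
      rfl
  | succ m ih =>
    intro i hik st seen hst
    have hiv : i + L ≤ cs.length := by omega
    have hin : i < cs.length := by omega
    rw [PySem.List.pyRange_one_cons (by exact_mod_cast hin)]
    unfold pvLoopA
    rw [if_neg (by omega)]
    simp only
    rw [pvTempA_eq cs L i hiv]
    rw [List.range'_succ]
    unfold pvRef
    by_cases hmem : pvWnd L cs i ∈ seen
    · rw [if_pos ((hst _).2 hmem), if_pos hmem]
    · rw [if_neg (by rw [hst _]; exact hmem), if_neg hmem]
      have : ((i : Int) + 1) = ((i + 1 : Nat) : Int) := by push_cast; ring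
      rw [this]
      exact ih (i + 1) (by omega) _ _ (by
        intro t
        rw [show (PySem.Set.add st (pvWnd L cs i)) = st.add (pvWnd L cs i) from rfl]
        rw [PySem.Set.contains_iff, PySem.Set.mem_add]
        constructor
        · rintro (h | h)
          · exact List.mem_cons_of_mem _ ((hst t).1 ((PySem.Set.contains_iff st t).2 h))
          · simp [h]
        · intro h
          rcases List.mem_cons.1 h with h | h
          · right; exact h
          · left; exact (PySem.Set.contains_iff st t).1 ((hst t).2 h))

theorem pvRunB (cs : List Char) (L : Nat) (hL : 1 ≤ L) (hLn : L ≤ cs.length) :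
    ∀ (k i : Nat), 1 ≤ i → i + k = cs.length - L + 1 →
    ∀ (d : PySem.Dict Int (List Int)) (seen : List (List Char)),
      pvSound L cs d i → pvComplete L cs d i →
      (∀ t, t ∈ seen ↔ ∃ j, j < i ∧ pvWnd L cs j = t) →
      pvLoopB (L : Int) cs (PySem.Int.powMod 131 (L - 1) pvM)
          (PySem.List.pyRange (i : Int) ((cs.length : Int) - (L : Int) + 1))
          (pvHH L cs (i - 1)) d
        = pvRef L cs (List.range' i k) seen := by
  intro k
  induction k with
  | zero =>
    intro i hi1 hik d seen _ _ _
    rw [PySem.List.pyRange_one_eq_nil (by omega)]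
    simp only [List.range'_zero]
    rfl
  | succ m ih =>
    intro i hi1 hik d seen hsound hcomp hseen
    have hiv : i + L ≤ cs.length := by omega
    have hc : i - 1 < cs.length := by omega
    have hy : i + L - 1 < cs.length := by omega
    rw [PySem.List.pyRange_one_cons (by omega)]
    unfold pvLoopB
    -- rewrite the two character fetches
    have e1 : (i : Int) - 1 = ((i - 1 : Nat) : Int) := by omega
    have e2 : (i : Int) + (L : Int) - 1 = ((i + L - 1 : Nat) : Int) := by omega
    rw [e1, e2, PySem.List.pyGetD_natCast, PySem.List.pyGetD_natCast,
        List.getD_eq_getElem cs default hc, List.getD_eq_getElem cs default hy,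
        pvRolling cs L i hi1 hiv hL hc hy, pvSlice_eq cs L i]
    rw [List.range'_succ]
    unfold pvRef
    simp only
    have hwnd_of_any : ∀ hit, d.get? (pvHH L cs i) = some hit →
        ((hit.any (fun j => PySem.List.slice cs (some j) (some (j + (L : Int))) == pvWnd L cs i)) = true
        ↔ ∃ j, j < i ∧ pvWnd L cs j = pvWnd L cs i) := by
      intro hit hget
      rw [List.any_eq_true]
      constructor
      · rintro ⟨x, hx, hslice⟩
        obtain ⟨j, rfl, hji, _⟩ := hsound _ _ hget x hx
        refine ⟨j, hji, ?_⟩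
        rw [pvSlice_eq cs L j] at hslice
        exact beq_iff_eq.1 hslice
      · rintro ⟨j, hji, hwe⟩
        have hhh : pvHH L cs j = pvHH L cs i := by simp only [pvHH, hwe]
        obtain ⟨js, hget', hmem⟩ := hcomp j hji
        rw [hhh, hget] at hget'
        cases hget'
        exact ⟨(j : Int), hmem, by rw [pvSlice_eq cs L j, hwe]; exact beq_iff_eq.2 rfl⟩
    by_cases hdup : ∃ j, j < i ∧ pvWnd L cs j = pvWnd L cs i
    · -- a duplicate exists: both sides return (true, wnd i)
      obtain ⟨j, hji, hwe⟩ := hdup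
      have hhh : pvHH L cs j = pvHH L cs i := by simp only [pvHH, hwe]
      obtain ⟨js, hget', hmem⟩ := hcomp j hji
      rw [hhh] at hget'
      rw [hget']
      simp only
      rw [if_pos ((hwnd_of_any js hget').2 ⟨j, hji, hwe⟩), if_pos ((hseen _).2 ⟨j, hji, hwe⟩)]
    · -- no duplicate yet: both recurse
      rw [if_neg (fun hm => hdup ((hseen _).1 hm))]
      have hseen' : ∀ t, t ∈ pvWnd L cs i :: seen ↔ ∃ j, j < i + 1 ∧ pvWnd L cs j = t := by
        intro t
        rw [List.mem_cons]
        constructor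
        · rintro (rfl | h)
          · exact ⟨i, by omega, rfl⟩
          · obtain ⟨j, hj, he⟩ := (hseen t).1 h; exact ⟨j, by omega, he⟩
        · rintro ⟨j, hj, he⟩
          by_cases hji : j = i
          · left; rw [← he, hji]
          · right; exact (hseen t).2 ⟨j, by omega, he⟩
      have hpred : (i + 1) - 1 = i := by omega
      have hcast : (i : Int) + 1 = ((i + 1 : Nat) : Int) := by push_cast; ring
      cases hget : d.get? (pvHH L cs i) with
      | none =>
        simp only
        rw [hcast]
        refine ih (i + 1) (by omega) (by omega) _ _ ?_ ?_ hseen'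
        · -- soundness after inserting the fresh bucket [i]
          intro v js hget' x hx
          by_cases hv : v = pvHH L cs i
          · subst hv
            rw [PySem.Dict.get?_insert_self] at hget'
            cases hget'
            rcases List.mem_singleton.1 hx with rfl
            exact ⟨i, rfl, by omega, rfl⟩
          · rw [PySem.Dict.get?_insert_of_ne _ _ hv] at hget'
            obtain ⟨j, rfl, hj, hh⟩ := hsound _ _ hget' x hx
            exact ⟨j, rfl, by omega, hh⟩
        · -- completeness
          intro j hj
          by_cases hji : j = i
          · subst hji
            exact ⟨[(j : Int)], PySem.Dict.get?_insert_self .., List.mem_singleton.2 rfl⟩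
          · obtain ⟨js, hg, hm⟩ := hcomp j (by omega)
            by_cases hv : pvHH L cs j = pvHH L cs i
            · rw [hv, hget] at hg; cases hg
            · rw [← PySem.Dict.get?_insert_of_ne d ([(i : Int)]) hv] at hg
              exact ⟨js, hg, hm⟩
      | some hit =>
        simp only
        rw [if_neg (fun hm => hdup ((hwnd_of_any hit hget).1 hm))]
        rw [hcast]
        refine ih (i + 1) (by omega) (by omega) _ _ ?_ ?_ hseen'
        · -- soundness after appending i to its bucket
          intro v js hget' x hx
          by_cases hv : v = pvHH L cs i
          · subst hv
            rw [PySem.Dict.get?_insert_self] at hget'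
            cases hget'
            rcases List.mem_append.1 hx with hx | hx
            · obtain ⟨j, rfl, hj, hh⟩ := hsound _ _ hget x hx
              exact ⟨j, rfl, by omega, hh⟩
            · rcases List.mem_singleton.1 hx with rfl
              exact ⟨i, rfl, by omega, rfl⟩
          · rw [PySem.Dict.get?_insert_of_ne _ _ hv] at hget'
            obtain ⟨j, rfl, hj, hh⟩ := hsound _ _ hget' x hx
            exact ⟨j, rfl, by omega, hh⟩
        · -- completeness
          intro j hj
          by_cases hji : j = i
          · subst hji
            exact ⟨hit ++ [(j : Int)], PySem.Dict.get?_insert_self ..,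
              List.mem_append.2 (Or.inr (List.mem_singleton.2 rfl))⟩
          · obtain ⟨js, hg, hm⟩ := hcomp j (by omega)
            by_cases hv : pvHH L cs j = pvHH L cs i
            · rw [hv, hget] at hg
              cases hg
              exact ⟨hit ++ [(i : Int)], by rw [hv]; exact PySem.Dict.get?_insert_self ..,
                List.mem_append.2 (Or.inl hm)⟩
            · rw [← PySem.Dict.get?_insert_of_ne d (hit ++ [(i : Int)]) hv] at hg
              exact ⟨js, hg, hm⟩


-- ===== VERDICT (by name: the statement is the Claim_ definition above) =====
theorem find_dupulicate_spec : Claim_equal_find_dupulicate := by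
  intro length s _ hpre
  unfold Spec_find_dupulicate
  have hpre' : 1 ≤ length := hpre
  set cs := s.toList with hcs
  have hclen : s.toList.length = cs.length := by rw [hcs]
  set L : Nat := length.toNat with hLdef
  have hlen : length = (L : Int) := by omega
  have hstrlen : PySem.Str.len s = (cs.length : Int) := by
    rw [hcs]
    simp [PySem.Str.len]
  by_cases hbig : (cs.length : Int) < length
  · -- length > len(s): both return (false, "")
    have hB : find_dupulicate_alt length s = (false, "") := by
      unfold find_dupulicate_alt
      rw [if_pos (Or.inr (by omega))]
    have hA : find_dupulicate length s = (false, "") := by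
      unfold find_dupulicate
      rw [hstrlen]
      rcases Nat.eq_zero_or_pos cs.length with h0 | h0
      · rw [h0]
        rfl
      · rw [PySem.List.pyRange_one_cons (by exact_mod_cast h0)]
        unfold pvLoopA
        rw [if_pos (by omega)]
    rw [hA, hB]
  · -- 1 ≤ length ≤ len(s): both sides reduce to the reference loop
    have hLn : L ≤ cs.length := by omega
    have hL1 : 1 ≤ L := by omega
    -- A's side
    have hA : find_dupulicate length s
        = ((pvRef L cs (List.range' 0 (cs.length - L + 1)) []).1,
           String.ofList (pvRef L cs (List.range' 0 (cs.length - L + 1)) []).2) := by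
      unfold find_dupulicate
      rw [hstrlen, hlen]
      rw [show ((0 : Int)) = ((0 : Nat) : Int) from rfl]
      rw [pvRunA cs L hL1 hLn (cs.length - L + 1) 0 (by omega) PySem.Set.empty []
        (by intro t; simp [PySem.Set.empty])]
    -- B's side
    have hpw' : ((L : Int) - 1).toNat = L - 1 := by omega
    have h0eq' : (PySem.List.slice cs none (some (L : Int))).foldl pvHStep 0 = pvHH L cs 0 := by
      rw [PySem.List.slice_to cs (by omega)]
      rw [show ((L : Int)).toNat = L from by omega]
      rw [show cs.take L = pvWnd L cs 0 from by simp [pvWnd]]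
      have := pvHStep_foldl (pvWnd L cs 0) 0
      rw [Int.zero_emod] at this
      rw [this]
      rfl
    have hS : pvSound L cs (PySem.Dict.insert PySem.Dict.empty (pvHH L cs 0) [0]) 1 := by
      intro v js hget x hx
      by_cases hv : v = pvHH L cs 0
      · subst hv
        rw [PySem.Dict.get?_insert_self] at hget
        cases hget
        rcases List.mem_singleton.1 hx with rfl
        exact ⟨0, rfl, by omega, rfl⟩
      · rw [PySem.Dict.get?_insert_of_ne _ _ hv, PySem.Dict.get?_empty] at hget
        cases hget
    have hC : pvComplete L cs (PySem.Dict.insert PySem.Dict.empty (pvHH L cs 0) [0]) 1 := by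
      intro j hj
      have : j = 0 := by omega
      subst this
      exact ⟨[0], PySem.Dict.get?_insert_self .., List.mem_singleton.2 rfl⟩
    have hSeen : ∀ t, t ∈ [pvWnd L cs 0] ↔ ∃ j, j < 1 ∧ pvWnd L cs j = t := by
      intro t
      simp only [List.mem_singleton]
      constructor
      · rintro rfl; exact ⟨0, by omega, rfl⟩
      · rintro ⟨j, hj, he⟩
        have : j = 0 := by omega
        subst this
        exact he.symm
    have hrun := pvRunB cs L hL1 hLn (cs.length - L) 1 (le_refl 1) (by omega)
      (PySem.Dict.insert PySem.Dict.empty (pvHH L cs 0) [0]) [pvWnd L cs 0] hS hC hSeen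
    rw [Nat.cast_one, show (1 : Nat) - 1 = 0 from rfl] at hrun
    have hB : find_dupulicate_alt length s
        = ((pvRef L cs (List.range' 0 (cs.length - L + 1)) []).1,
           String.ofList (pvRef L cs (List.range' 0 (cs.length - L + 1)) []).2) := by
      unfold find_dupulicate_alt
      rw [if_neg (by rintro (h | h) <;> omega)]
      conv_rhs =>
        rw [show cs.length - L + 1 = (cs.length - L) + 1 from by omega, List.range'_succ,
          pvRef_cons, if_neg (List.not_mem_nil), Nat.zero_add]
      rw [hlen, hpw', h0eq']
      exact congrArg (fun r : Bool × List Char => (r.1, String.ofList r.2)) hrun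
    rw [hA, hB]
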